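-- pv_equiv track=rewrite | github.com/pypi-data/pypi-mirror-398 | packages/pytailwind/pytailwind-0.0.7-py3-none-any.whl/pytailwind/utils.py | replace_underscores_safe
-- ===== SOURCE A (Python) =====
-- def replace_underscores_safe(value):
--     """
--     Replace _ with space, but not inside quotes ' " ` or url(...).
--     Tailwind treats _ as space in arbitrary values unless quoted/escaped.
--     """
--     res = []
--     quote = None
--     i = 0
--     while i < len(value):
--         char = value[i]
--
--         # Check for escaped char (basic handling)
--         if char == '\\' and i + 1 < len(value):
--             res.append(char)
--             res.append(value[i + 1])
--             i += 2
--             continue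
--
--         if quote:
--             res.append(char)
--             if char == quote:
--                 quote = None
--         elif char in ["'", '"', "`"]:
--             quote = char
--             res.append(char)
--         elif char == "_":
--             res.append(" ")
--         else:
--             res.append(char)
--         i += 1
--     return "".join(res)
-- ===== SOURCE B (Python) =====
-- def replace_underscores_safe(value):
--     """
--     Replace _ with space, but not inside quotes ' " ` or escapes.
--     Tokenizer: consume escape pairs and whole quoted runs as slices,
--     no per-character quote state.
--     """
--     out = []
--     i, n = 0, len(value)
--     while i < n:
--         c = value[i]
--         if c == '\\' and i + 1 < n:
--             out.append(value[i:i + 2])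
--             i += 2
--         elif c in '\'"`':
--             j = i + 1
--             while j < n:
--                 d = value[j]
--                 if d == '\\' and j + 1 < n:
--                     j += 2
--                 elif d == c:
--                     j += 1
--                     break
--                 else:
--                     j += 1
--             out.append(value[i:j])
--             i = j
--         elif c == '_':
--             out.append(' ')
--             i += 1
--         else:
--             out.append(c)
--             i += 1
--     return ''.join(out)
-- ===== Notes on version B (the rewrite author's own statement) =====
-- stated objective: alternative
-- what changed: Replaces A's single flat loop with a mutable quote-state variable by a stateless tokenizer that consumes escape pairs and entire quoted runs as whole slices via a dedicated inner scan, emitting each token unchanged and each bare underscore as a space.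
import Mathlib
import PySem

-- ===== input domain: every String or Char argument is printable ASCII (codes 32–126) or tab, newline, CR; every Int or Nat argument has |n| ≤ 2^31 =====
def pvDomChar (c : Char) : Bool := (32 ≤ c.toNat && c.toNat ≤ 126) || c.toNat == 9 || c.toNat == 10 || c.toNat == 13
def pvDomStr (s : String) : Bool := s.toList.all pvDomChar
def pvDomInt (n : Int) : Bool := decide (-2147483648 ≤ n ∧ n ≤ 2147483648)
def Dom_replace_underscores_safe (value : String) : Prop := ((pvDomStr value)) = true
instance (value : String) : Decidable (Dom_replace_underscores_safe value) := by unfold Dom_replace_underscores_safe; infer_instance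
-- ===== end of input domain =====

-- B replaces A's single-pass quote-state machine by a stateless tokenizer that
-- consumes escape pairs and whole quoted runs as slices (objective: alternative).


-- ===== PORT A =====
-- A's while loop: the index i over `value` becomes structural recursion on the
-- remaining characters; the mutable `quote` variable is the Option Char state;
-- the escape branch requires i+1 < len, i.e. a second remaining character.
def pvGoA : Option Char → List Char → List Char
  | q, '\\' :: d :: rest => '\\' :: d :: pvGoA q rest
  | q, c :: rest =>
      match q with
      | some qc => c :: pvGoA (if c = qc then none else some qc) rest
      | none =>
          if c = '\'' ∨ c = '"' ∨ c = '`' then c :: pvGoA (some c) rest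
          else if c = '_' then ' ' :: pvGoA none rest
          else c :: pvGoA none rest
  | _, [] => []

def replace_underscores_safe (value : String) : String :=
  String.ofList (pvGoA none value.toList)

-- ===== PORT B =====
-- B's inner loop: consume a quoted run (escape pairs skipped, closing quote
-- included) and return (run, remainder).
def pvTakeQuoted : Char → List Char → List Char × List Char
  | _, [] => ([], [])
  | qc, '\\' :: d :: rest =>
      ('\\' :: d :: (pvTakeQuoted qc rest).1, (pvTakeQuoted qc rest).2)
  | qc, c :: rest =>
      if c = qc then ([c], rest)
      else (c :: (pvTakeQuoted qc rest).1, (pvTakeQuoted qc rest).2)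

theorem pvTakeQuoted_len (qc : Char) (l : List Char) :
    (pvTakeQuoted qc l).2.length ≤ l.length := by
  fun_induction pvTakeQuoted qc l with
  | case1 => simp
  | case2 qc d rest ih => exact Nat.le_trans ih (by simp; omega)
  | case3 => simp
  | case4 qc c rest hne h ih => exact Nat.le_trans ih (by simp)

-- B's outer loop: emit escape pairs, whole quoted runs, ' ' for '_', else the char.
def pvGoB : List Char → List Char
  | '\\' :: d :: rest => '\\' :: d :: pvGoB rest
  | c :: rest =>
      if c = '\'' ∨ c = '"' ∨ c = '`' then
        c :: ((pvTakeQuoted c rest).1 ++ pvGoB (pvTakeQuoted c rest).2)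
      else if c = '_' then ' ' :: pvGoB rest
      else c :: pvGoB rest
  | [] => []
termination_by l => l.length
decreasing_by
  · simp
  · exact Nat.lt_succ_of_le (pvTakeQuoted_len _ _)
  all_goals simp

def replace_underscores_safe_alt (value : String) : String :=
  String.ofList (pvGoB value.toList)

-- ===== PRECONDITION & SPEC =====
def Spec_replace_underscores_safe (value : String) (out : String) : Prop := out = replace_underscores_safe_alt value
instance (value : String) (out : String) : Decidable (Spec_replace_underscores_safe value out) := by unfold Spec_replace_underscores_safe; infer_instance

-- ===== CLAIM (what is proved, stated in full; the proofs are below) =====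
def Claim_equal_replace_underscores_safe : Prop := ∀ (value : String), Dom_replace_underscores_safe value → Spec_replace_underscores_safe value (replace_underscores_safe value)

-- ===== LEMMAS AND PROOFS =====
-- Inside a quote, A emits every char unchanged until the quote closes: exactly B's quoted run.
theorem pvGoA_some (qc : Char) (l : List Char) :
    pvGoA (some qc) l = (pvTakeQuoted qc l).1 ++ pvGoA none (pvTakeQuoted qc l).2 := by
  fun_induction pvTakeQuoted qc l with
  | case1 => simp [pvGoA]
  | case2 qc d rest ih => simp [pvGoA, ih]
  | case3 qc rest hne =>
      cases rest with
      | nil => simp [pvGoA]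
      | cons d r =>
          have hc : ¬ (qc = '\\') := fun hcc => hne d r hcc rfl
          simp [pvGoA]
  | case4 qc c rest hne h ih =>
      have hA : pvGoA (some qc) (c :: rest)
          = c :: pvGoA (some qc) rest := by
        cases rest with
        | nil => cases hc : decide (c = '\\') <;> simp_all [pvGoA]
        | cons d r =>
            have hc : ¬ (c = '\\') := fun hcc => hne d r hcc rfl
            simp [pvGoA, h]
      rw [hA, ih]
      simp

theorem pvGoA_eq_pvGoB (l : List Char) : pvGoA none l = pvGoB l := by
  fun_induction pvGoB l with
  | case1 d rest ih => simp [pvGoA, ih]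
  | case2 c rest hne hq ih =>
      have hc : ¬ (c = '\\') := by
        rintro rfl; rcases hq with h|h|h <;> simp_all
      have hA : pvGoA none (c :: rest) = c :: pvGoA (some c) rest := by
        cases rest with
        | nil => simp [pvGoA, hq]
        | cons d r => simp [pvGoA, hq]
      rw [hA, pvGoA_some, ih]
  | case3 rest hne hq ih =>
      cases rest with
      | nil => simp [pvGoA, ← ih]
      | cons d r => simp [pvGoA, ← ih]
  | case4 c rest hne hq hu ih =>
      have hA : pvGoA none (c :: rest) = c :: pvGoA none rest := by
        cases rest with
        | nil => cases hc : decide (c = '\\') <;> simp_all [pvGoA]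
        | cons d r => simp [pvGoA, hq, hu]
      rw [hA, ih]
  | case5 => simp [pvGoA]

-- ===== VERDICT (by name: the statement is the Claim_ definition above) =====
theorem replace_underscores_safe_spec : Claim_equal_replace_underscores_safe := by
  intro value _
  unfold Spec_replace_underscores_safe replace_underscores_safe replace_underscores_safe_alt
  rw [pvGoA_eq_pvGoB]
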